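-- pv_equiv track=rewrite | github.com/rodrigossbjj/Estrutura-Dados | recursao.py | removePares
-- ===== SOURCE A (Python) =====
-- def removePares(n):
--     if n < 10:
--         if n%2==0:
--             return 0
--         return n
--
--     if (n%10) % 2 == 0:
--         return removePares(n // 10)
--     else:
--         return removePares(n // 10) * 10 + (n%10)
-- ===== SOURCE B (Python) =====
-- def removePares(n):
--     # Keep the same base case as A: single "digit" (or any n < 10, incl. negatives).
--     if n < 10:
--         return 0 if n % 2 == 0 else n
--     # Iterative digit peel instead of recursion: collect odd digits with a place multiplier.
--     res, mul = 0, 1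
--     while n > 0:
--         d = n % 10
--         if d % 2 == 1:
--             res += d * mul
--             mul *= 10
--         n //= 10
--     return res
-- ===== Notes on version B (the rewrite author's own statement) =====
-- stated objective: simpler
-- what changed: Replaced the per-digit recursion that rebuilds the result on the way back up with a single explicit while-loop that peels digits and accumulates odd digits via a place multiplier.
import Mathlib
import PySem

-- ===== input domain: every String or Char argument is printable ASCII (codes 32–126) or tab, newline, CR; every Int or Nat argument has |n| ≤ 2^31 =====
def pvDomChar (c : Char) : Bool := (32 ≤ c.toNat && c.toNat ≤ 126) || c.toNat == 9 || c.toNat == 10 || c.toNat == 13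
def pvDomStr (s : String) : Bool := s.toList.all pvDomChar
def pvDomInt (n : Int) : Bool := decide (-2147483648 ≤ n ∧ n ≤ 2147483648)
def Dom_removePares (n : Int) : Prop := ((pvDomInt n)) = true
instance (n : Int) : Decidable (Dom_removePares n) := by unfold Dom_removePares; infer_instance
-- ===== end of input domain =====

-- B replaces A's per-digit recursion by one iterative pass peeling digits with a place multiplier (objective: simpler).


-- ===== PORT A =====
def removePares (n : Int) : Int :=
  if n < 10 then
    if PySem.Int.mod n 2 = 0 then 0 else n
  else if PySem.Int.mod (PySem.Int.mod n 10) 2 = 0 then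
    removePares (PySem.Int.floordiv n 10)
  else
    removePares (PySem.Int.floordiv n 10) * 10 + PySem.Int.mod n 10
termination_by n.toNat
decreasing_by
  all_goals
    rw [PySem.Int.floordiv_eq_ediv_of_pos (by norm_num)]
    omega

-- ===== PORT B =====
-- the while-loop of Source B: state (n, res, mul)
def removeParesLoop (n res mul : Int) : Int :=
  if 0 < n then
    let d := PySem.Int.mod n 10
    if PySem.Int.mod d 2 = 1 then
      removeParesLoop (PySem.Int.floordiv n 10) (res + d * mul) (mul * 10)
    else
      removeParesLoop (PySem.Int.floordiv n 10) res mul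
  else res
termination_by n.toNat
decreasing_by
  all_goals
    rw [PySem.Int.floordiv_eq_ediv_of_pos (by norm_num)]
    omega

def removePares_alt (n : Int) : Int :=
  if n < 10 then
    if PySem.Int.mod n 2 = 0 then 0 else n
  else removeParesLoop n 0 1

-- ===== PRECONDITION & SPEC =====
def Spec_removePares (n : Int) (out : Int) : Prop := out = removePares_alt n
instance (n : Int) (out : Int) : Decidable (Spec_removePares n out) := by unfold Spec_removePares; infer_instance

-- ===== CLAIM (what is proved, stated in full; the proofs are below) =====
def Claim_equal_removePares : Prop := ∀ (n : Int), Dom_removePares n → Spec_removePares n (removePares n)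

-- ===== LEMMAS AND PROOFS =====

-- loop invariant: for positive n the loop adds mul * (A's value on n) to the accumulator
theorem removeParesLoop_eq (k : Nat) :
    ∀ (n res mul : Int), n.toNat = k → 1 ≤ n →
      removeParesLoop n res mul = res + mul * removePares n := by
  induction k using Nat.strong_induction_on with
  | _ k ih =>
    intro n res mul hk hn
    have hdvpos : PySem.Int.floordiv n 10 = n / 10 :=
      PySem.Int.floordiv_eq_ediv_of_pos (by norm_num)
    have hmod : PySem.Int.mod n 10 = n % 10 :=
      PySem.Int.mod_eq_emod_of_pos (by norm_num)
    have hd2 : PySem.Int.mod (n % 10) 2 = (n % 10) % 2 :=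
      PySem.Int.mod_eq_emod_of_pos (by norm_num)
    rw [removeParesLoop]
    simp only [if_pos (show (0:Int) < n by omega), hmod, hdvpos, hd2]
    by_cases hsmall : n < 10
    · -- last iteration: n / 10 = 0, loop returns the accumulator
      have hq : n / 10 = 0 := by omega
      have hstop : removeParesLoop 0 = fun res _ => res := by
        funext r m; rw [removeParesLoop, if_neg (by norm_num)]
      have hn10 : n % 10 = n := by omega
      rw [removePares, if_pos hsmall,
          PySem.Int.mod_eq_emod_of_pos (b := 2) (by norm_num)]
      by_cases hodd : (n % 10) % 2 = 1
      · rw [if_pos hodd, hq, hstop, if_neg (by omega), hn10]; ring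
      · rw [if_neg hodd, hq, hstop, if_pos (by omega)]; ring
    · -- n ≥ 10: recurse on n / 10
      have hq1 : 1 ≤ n / 10 := by omega
      have hlt : (n / 10).toNat < k := by omega
      have hrec : ∀ r m : Int, removeParesLoop (n / 10) r m
          = r + m * removePares (n / 10) :=
        fun r m => ih _ hlt (n / 10) r m rfl hq1
      rw [removePares]
      simp only [if_neg hsmall, hmod, hdvpos, hd2]
      by_cases hodd : (n % 10) % 2 = 1
      · rw [if_pos hodd, if_neg (by omega), hrec]; ring
      · rw [if_neg hodd, if_pos (by omega), hrec]

-- ===== VERDICT (by name: the statement is the Claim_ definition above) =====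
theorem removePares_spec : Claim_equal_removePares := by
  intro n _
  unfold Spec_removePares removePares_alt
  by_cases h : n < 10
  · rw [removePares, if_pos h, if_pos h]
  · rw [if_neg h, removeParesLoop_eq (n.toNat) n 0 1 rfl (by omega)]
    ring
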